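-- pv_equiv track=rewrite | github.com/LilaShiba/2020_lessons | daily_problems/034_merge_crowd.py | should_swap
-- ===== SOURCE A (Python) =====
-- def should_swap(seats, median, rev=False):
--     mark = False
--
--     if rev:
--         for x in seats[median+1:]:
--             if x == 0:
--                 mark = True
--             if x == 1 and mark:
--                 return True
--         return False
--
--
--     for x in seats[:median]:
--         if x == 1:
--             mark = True
--         if x == 0 and mark:
--             return True
--     return False
-- ===== SOURCE B (Python) =====
-- def should_swap(seats, median, rev=False):
--     if rev:
--         sub = seats[median + 1:]
--         trigger, target = 0, 1
--     else:
--         sub = seats[:median]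
--         trigger, target = 1, 0
--     if trigger not in sub or target not in sub:
--         return False
--     # swap needed iff the FIRST trigger sits strictly before the LAST target
--     return sub.index(trigger) < len(sub) - 1 - sub[::-1].index(target)
-- ===== Notes on version B (the rewrite author's own statement) =====
-- stated objective: alternative
-- what changed: Replaces A's flag-driven sequential state machine with a positional comparison: B computes the first index of the trigger and the last index of the target (via a reversed scan) and returns whether the first strictly precedes the last, instead of walking the slice carrying a mark flag.
import Mathlib
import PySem

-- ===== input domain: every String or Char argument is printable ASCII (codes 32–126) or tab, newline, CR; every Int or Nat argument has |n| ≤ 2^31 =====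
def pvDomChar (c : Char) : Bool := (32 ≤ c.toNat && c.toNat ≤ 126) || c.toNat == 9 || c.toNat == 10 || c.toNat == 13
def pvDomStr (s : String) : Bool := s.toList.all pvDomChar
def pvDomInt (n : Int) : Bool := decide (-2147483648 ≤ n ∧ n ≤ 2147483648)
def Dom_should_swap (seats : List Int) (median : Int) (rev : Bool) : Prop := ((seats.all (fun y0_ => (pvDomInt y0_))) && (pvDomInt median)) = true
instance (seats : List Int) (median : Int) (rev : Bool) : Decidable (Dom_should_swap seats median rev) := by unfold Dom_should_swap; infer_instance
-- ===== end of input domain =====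

-- B replaces A's flag state machine with a positional comparison: first index of the
-- trigger vs last index of the target (found by a reversed scan); objective: alternative.

-- ===== PORT A =====
-- the forward loop: mark on 1, report on 0 after mark
def loopFwd : List Int → Bool → Bool
  | [], _ => false
  | x :: xs, mark =>
    let mark := if x == (1 : Int) then true else mark
    if x == (0 : Int) && mark then true else loopFwd xs mark

-- the rev-branch loop: mark on 0, report on 1 after mark
def loopRev : List Int → Bool → Bool
  | [], _ => false
  | x :: xs, mark =>
    let mark := if x == (0 : Int) then true else mark
    if x == (1 : Int) && mark then true else loopRev xs mark

def should_swap (seats : List Int) (median : Int) (rev : Bool) : Bool :=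
  if rev then loopRev (PySem.List.slice seats (some (median + 1)) none) false
  else loopFwd (PySem.List.slice seats none (some median)) false

-- ===== PORT B =====
def should_swap_alt (seats : List Int) (median : Int) (rev : Bool) : Bool :=
  let sub := if rev then PySem.List.slice seats (some (median + 1)) none
             else PySem.List.slice seats none (some median)
  let trigger : Int := if rev then 0 else 1
  let target : Int := if rev then 1 else 0
  if trigger ∉ sub ∨ target ∉ sub then false
  else
    -- sub.index(trigger) < len(sub) - 1 - sub[::-1].index(target)
    match PySem.List.index? sub trigger,
          ((PySem.List.slice? sub none none (-1)).getD []) |>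
            (fun r => PySem.List.index? r target) with
    | some i, some r =>
        decide ((i : Int) < (sub.length : Int) - 1 - (r : Int))
    | _, _ => false

-- ===== PRECONDITION & SPEC =====
def Spec_should_swap (seats : List Int) (median : Int) (rev : Bool) (out : Bool) : Prop := out = should_swap_alt seats median rev
instance (seats : List Int) (median : Int) (rev : Bool) (out : Bool) : Decidable (Spec_should_swap seats median rev out) := by unfold Spec_should_swap; infer_instance

-- ===== CLAIM (what is proved, stated in full; the proofs are below) =====
def Claim_equal_should_swap : Prop := ∀ (seats : List Int) (median : Int) (rev : Bool), Dom_should_swap seats median rev → Spec_should_swap seats median rev (should_swap seats median rev)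

-- ===== LEMMAS AND PROOFS =====

-- with the flag already set, the forward loop just looks for a 0
lemma loopFwd_true (l : List Int) : loopFwd l true = decide ((0 : Int) ∈ l) := by
  induction l with
  | nil => simp [loopFwd]
  | cons x xs ih =>
    by_cases h0 : x = 0
    · simp [loopFwd, h0]
    · simp [loopFwd, h0, ih]
      exact fun h => absurd h.symm h0

lemma loopRev_true (l : List Int) : loopRev l true = decide ((1 : Int) ∈ l) := by
  induction l with
  | nil => simp [loopRev]
  | cons x xs ih =>
    by_cases h1 : x = 1
    · simp [loopRev, h1]
    · simp [loopRev, h1, ih]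
      exact fun h => absurd h.symm h1

-- the forward loop from a clear flag = index of first 1, then membership of 0 in the suffix
lemma loopFwd_false (l : List Int) :
    loopFwd l false =
      (if (1 : Int) ∈ l then
        match PySem.List.index? l 1 with
        | some i => decide ((0 : Int) ∈ l.drop (i + 1))
        | none => false
      else false) := by
  induction l with
  | nil => simp [loopFwd]
  | cons x xs ih =>
    by_cases h1 : x = 1
    · subst h1
      rw [PySem.List.index?_cons_self]
      simp [loopFwd, loopFwd_true]
    · rw [PySem.List.index?_cons_of_ne xs h1]
      by_cases h0 : x = 0
      · subst h0
        simp only [loopFwd, ih]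
        rw [PySem.List.index?_eq_idxOf?]
        simp only [List.mem_cons]
        have : ((1:Int) = 0 ∨ (1:Int) ∈ xs) ↔ (1:Int) ∈ xs := by simp
        rw [if_congr this rfl rfl]
        cases hix : List.idxOf? (1:Int) xs with
        | none => simp [hix, ih, PySem.List.index?_eq_idxOf?]
        | some v =>
          have hm : (1:Int) ∈ xs := (PySem.List.index?_isSome_iff xs 1).mp
            (by simp [PySem.List.index?_eq_idxOf?, hix])
          simp [hix, ih, hm, PySem.List.index?_eq_idxOf?]
      · simp only [loopFwd, ih]
        simp only [List.mem_cons]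
        have hx1 : ¬ ((1:Int) = x) := fun h => h1 h.symm
        rw [if_congr (show ((1:Int) = x ∨ (1:Int) ∈ xs) ↔ (1:Int) ∈ xs by simp [hx1]) rfl rfl]
        rw [PySem.List.index?_eq_idxOf?]
        cases hix : List.idxOf? (1:Int) xs with
        | none => simp [hix, ih, h1, hx1, PySem.List.index?_eq_idxOf?]
        | some v =>
          have hm : (1:Int) ∈ xs := (PySem.List.index?_isSome_iff xs 1).mp
            (by simp [PySem.List.index?_eq_idxOf?, hix])
          simp [hix, ih, hm, h0, h1, PySem.List.index?_eq_idxOf?]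

lemma loopRev_false (l : List Int) :
    loopRev l false =
      (if (0 : Int) ∈ l then
        match PySem.List.index? l 0 with
        | some i => decide ((1 : Int) ∈ l.drop (i + 1))
        | none => false
      else false) := by
  induction l with
  | nil => simp [loopRev]
  | cons x xs ih =>
    by_cases h0 : x = 0
    · subst h0
      rw [PySem.List.index?_cons_self]
      simp [loopRev, loopRev_true]
    · rw [PySem.List.index?_cons_of_ne xs h0]
      by_cases h1 : x = 1
      · subst h1
        simp only [loopRev, ih]
        rw [PySem.List.index?_eq_idxOf?]
        simp only [List.mem_cons]
        rw [if_congr (show ((0:Int) = 1 ∨ (0:Int) ∈ xs) ↔ (0:Int) ∈ xs by simp) rfl rfl]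
        cases hix : List.idxOf? (0:Int) xs with
        | none => simp [hix, ih, PySem.List.index?_eq_idxOf?]
        | some v =>
          have hm : (0:Int) ∈ xs := (PySem.List.index?_isSome_iff xs 0).mp
            (by simp [PySem.List.index?_eq_idxOf?, hix])
          simp [hix, ih, hm, PySem.List.index?_eq_idxOf?]
      · simp only [loopRev, ih]
        simp only [List.mem_cons]
        have hx0 : ¬ ((0:Int) = x) := fun h => h0 h.symm
        rw [if_congr (show ((0:Int) = x ∨ (0:Int) ∈ xs) ↔ (0:Int) ∈ xs by simp [hx0]) rfl rfl]
        rw [PySem.List.index?_eq_idxOf?]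
        cases hix : List.idxOf? (0:Int) xs with
        | none => simp [hix, ih, h0, hx0, PySem.List.index?_eq_idxOf?]
        | some v =>
          have hm : (0:Int) ∈ xs := (PySem.List.index?_isSome_iff xs 0).mp
            (by simp [PySem.List.index?_eq_idxOf?, hix])
          simp [hix, ih, hm, h0, h1, PySem.List.index?_eq_idxOf?]

-- membership of b in l.drop (i+1) ↔ first index of b in the REVERSED list points after i
lemma mem_drop_iff_rev_index (l : List Int) (b : Int) (r i : Nat)
    (hr : PySem.List.index? l.reverse b = some r) :
    ((b ∈ l.drop (i + 1)) ↔ ((i : Int) < (l.length : Int) - 1 - (r : Int))) := by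
  obtain ⟨hrlen, hget, hmin⟩ := PySem.List.getElem_of_index?_eq_some hr
  have hrl : r < l.length := by simpa using hrlen
  have hlast : l[l.length - 1 - r]'(by omega) = b := by
    rw [List.getElem_reverse] at hget
    exact hget
  constructor
  · intro hmem
    obtain ⟨k, hk, hkb⟩ := List.getElem_of_mem hmem
    have hklen : i + 1 + k < l.length := by
      have := hk; simp [List.length_drop] at this; omega
    have hkb' : l[i + 1 + k]'hklen = b := by
      simpa [List.getElem_drop] using hkb
    -- reverse position of i+1+k
    have hrevpos : l.length - 1 - (i + 1 + k) < l.reverse.length := by simp; omega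
    have : l.reverse[l.length - 1 - (i + 1 + k)]'hrevpos = b := by
      rw [List.getElem_reverse]
      have : l.length - 1 - (l.length - 1 - (i + 1 + k)) = i + 1 + k := by omega
      simp only [this]; exact hkb'
    have hge : ¬ (l.length - 1 - (i + 1 + k) < r) := fun hlt => hmin _ hlt this
    omega
  · intro hlt
    have hij : i + 1 ≤ l.length - 1 - r := by omega
    have hk : (l.length - 1 - r) - (i + 1) < (l.drop (i + 1)).length := by
      simp [List.length_drop]; omega
    have : (l.drop (i + 1))[(l.length - 1 - r) - (i + 1)]'hk = b := by
      rw [List.getElem_drop]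
      have : i + 1 + ((l.length - 1 - r) - (i + 1)) = l.length - 1 - r := by omega
      simp only [this]; exact hlast
    exact this ▸ List.getElem_mem hk

-- A's drop-membership form equals B's index comparison, given both values occur
lemma drop_eq_cmp (l : List Int) (a b : Int) (ha : a ∈ l) (hb : b ∈ l) :
    (match PySem.List.index? l a with
      | some i => decide (b ∈ l.drop (i + 1))
      | none => false) =
    (match PySem.List.index? l a, PySem.List.index? l.reverse b with
      | some i, some r => decide ((i : Int) < (l.length : Int) - 1 - (r : Int))
      | _, _ => false) := by
  cases hia : PySem.List.index? l a with
  | none => rfl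
  | some i =>
    cases hrb : PySem.List.index? l.reverse b with
    | none =>
      exact absurd (List.mem_reverse.mpr hb) ((PySem.List.index?_eq_none_iff _ _).mp hrb)
    | some r =>
      simp only []
      rw [decide_eq_decide]
      exact mem_drop_iff_rev_index l b r i hrb

-- ===== VERDICT (by name: the statement is the Claim_ definition above) =====
theorem should_swap_spec : Claim_equal_should_swap := by
  intro seats median rev _
  unfold Spec_should_swap should_swap should_swap_alt
  cases rev
  · simp only [Bool.false_eq_true, if_false]
    by_cases h1 : (1 : Int) ∈ PySem.List.slice seats none (some median)
    · by_cases h0 : (0 : Int) ∈ PySem.List.slice seats none (some median)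
      · rw [loopFwd_false, if_pos h1,
            drop_eq_cmp _ 1 0 h1 h0]
        simp [h1, h0, PySem.List.slice?_none_none_neg_one]
      · rw [loopFwd_false, if_pos h1]
        have : ∀ i : Nat, (0:Int) ∉ (PySem.List.slice seats none (some median)).drop (i+1) :=
          fun i hm => h0 (List.mem_of_mem_drop hm)
        cases hix : PySem.List.index? (PySem.List.slice seats none (some median)) 1 with
        | none => simp [h0]
        | some i => simp [this i, h0]
    · rw [loopFwd_false, if_neg h1]
      simp [h1]
  · simp only [if_true]
    by_cases h0 : (0 : Int) ∈ PySem.List.slice seats (some (median + 1)) none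
    · by_cases h1 : (1 : Int) ∈ PySem.List.slice seats (some (median + 1)) none
      · rw [loopRev_false, if_pos h0,
            drop_eq_cmp _ 0 1 h0 h1]
        simp [h1, h0, PySem.List.slice?_none_none_neg_one]
      · rw [loopRev_false, if_pos h0]
        have : ∀ i : Nat, (1:Int) ∉ (PySem.List.slice seats (some (median + 1)) none).drop (i+1) :=
          fun i hm => h1 (List.mem_of_mem_drop hm)
        cases hix : PySem.List.index? (PySem.List.slice seats (some (median + 1)) none) 0 with
        | none => simp [h1]
        | some i => simp [this i, h1]
    · rw [loopRev_false, if_neg h0]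
      simp [h0]
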